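-- pv_equiv track=rewrite | github.com/bana12219/notes | scripts/python/freq.py | analiza
-- ===== SOURCE A (Python) =====
-- def analiza(texto):
--     ocurrencias={}
--     for c in texto:
--         c=c.lower()
--         if c == ' ':
--             continue
--         if c in ocurrencias:
--             ocurrencias[c]+=1
--             continue
--         ocurrencias[c]=1
--     return ocurrencias
-- ===== SOURCE B (Python) =====
-- def analiza(texto):
--     # sort-then-group: count by run lengths of the sorted character list,
--     # then emit the counts in first-occurrence order.
--     chars = [c for c in texto.lower() if c != ' ']
--     runs = []  # (char, run length) for each run of the sorted list, most recent run first
--     for c in sorted(chars):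
--         if runs and runs[0][0] == c:
--             runs[0] = (c, runs[0][1] + 1)
--         else:
--             runs = [(c, 1)] + runs
--     rd = dict(runs)
--     return {c: rd.get(c, 0) for c in dict.fromkeys(chars)}
-- ===== Notes on version B (the rewrite author's own statement) =====
-- stated objective: alternative
-- what changed: Replaces A's hash-based incremental dict counting with sort-then-group: the characters are filtered and lowered once, the sorted list is run-length encoded, and the run lengths are emitted as a dict in first-occurrence order.
import Mathlib
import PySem

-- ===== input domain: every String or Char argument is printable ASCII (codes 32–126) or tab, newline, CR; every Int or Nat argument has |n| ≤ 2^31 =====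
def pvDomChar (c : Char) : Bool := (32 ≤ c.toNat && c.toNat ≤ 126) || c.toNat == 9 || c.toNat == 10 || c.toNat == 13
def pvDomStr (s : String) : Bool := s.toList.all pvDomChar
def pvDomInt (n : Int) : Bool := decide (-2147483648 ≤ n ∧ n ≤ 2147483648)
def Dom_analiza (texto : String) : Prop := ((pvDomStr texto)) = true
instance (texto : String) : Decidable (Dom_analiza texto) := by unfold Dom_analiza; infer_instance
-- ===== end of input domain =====

-- B replaces A's hash-based incremental counting by sort-then-group-runs: the counts are the
-- run lengths of the sorted character list, re-emitted in first-occurrence order.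
-- Python's one-character strings are modeled as Lean Char (exact: c.lower() on a one-char
-- string is PySem.Chars.lowerChar); the returned dict is materialised to its items list.

-- ===== PORT A =====
def aStep (d : PySem.Dict Char Int) (ch : Char) : PySem.Dict Char Int :=
  let c := PySem.Chars.lowerChar ch
  if c == ' ' then d
  else if d.contains c then d.modify c 0 (· + 1)
  else d.insert c 1

def analiza (texto : String) : List (String × Int) :=
  ((texto.toList.foldl aStep PySem.Dict.empty).items).map
    (fun p => (String.singleton p.1, p.2))

-- ===== PORT B =====
-- one step of the run-length scan over the sorted character list (runs kept most recent first)
def bRunStep (rs : List (Char × Int)) (c : Char) : List (Char × Int) :=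
  match rs with
  | (c', n) :: rest => if c' == c then (c, n + 1) :: rest else (c, 1) :: (c', n) :: rest
  | [] => [(c, 1)]

def analiza_alt (texto : String) : List (String × Int) :=
  let chars := (PySem.Str.lower texto).toList.filter (fun c => c != ' ')
  let runs := (PySem.List.sorted chars id).foldl bRunStep []
  let rd := runs.foldl (fun (d : PySem.Dict Char Int) p => d.insert p.1 p.2) PySem.Dict.empty
  (PySem.List.dedup chars).map (fun c => (String.singleton c, rd.getD c 0))

-- ===== PRECONDITION & SPEC =====
def Spec_analiza (texto : String) (out : List (String × Int)) : Prop := out = analiza_alt texto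
instance (texto : String) (out : List (String × Int)) : Decidable (Spec_analiza texto out) := by unfold Spec_analiza; infer_instance

-- ===== CLAIM =====
def Claim_equal_analiza : Prop := ∀ (texto : String), Dom_analiza texto → Spec_analiza texto (analiza texto)

-- ===== LEMMAS AND PROOFS =====

theorem foldl_aStep_eq (l : List Char) (d : PySem.Dict Char Int) :
    l.foldl aStep d
      = ((PySem.Chars.lower l).filter (fun c => c != ' ')).foldl
          (fun d c => d.insert c (d.getD c 0 + 1)) d := by
  induction l generalizing d with
  | nil => simp [PySem.Chars.lower]
  | cons a l ih =>
    have hlow : PySem.Chars.lower (a :: l) = PySem.Chars.lowerChar a :: PySem.Chars.lower l := by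
      simp [PySem.Chars.lower]
    rw [hlow]
    by_cases hsp : (PySem.Chars.lowerChar a == ' ') = true
    · have h1 : aStep d a = d := by simp [aStep, hsp]
      simp only [List.foldl_cons, h1, List.filter_cons, bne, hsp]
      simpa using ih d
    · have hcb : (PySem.Chars.lowerChar a == ' ') = false := by
        simpa using hsp
      have h1 : aStep d a = d.insert (PySem.Chars.lowerChar a) (d.getD (PySem.Chars.lowerChar a) 0 + 1) := by
        unfold aStep
        simp only [hcb, Bool.false_eq_true, if_false]
        by_cases hct : d.contains (PySem.Chars.lowerChar a) = true
        · simp [hct, PySem.Dict.modify]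
        · have hcf : d.contains (PySem.Chars.lowerChar a) = false := by
            cases hval : d.contains (PySem.Chars.lowerChar a) with
            | true => exact absurd hval hct
            | false => rfl
          have hany : d.items.any (fun p => p.1 == PySem.Chars.lowerChar a) = false := by
            simpa only [PySem.Dict.contains] using hcf
          have hfind : d.items.find? (fun p => p.1 == PySem.Chars.lowerChar a) = none := by
            rw [List.find?_eq_none]
            intro x hx hpx
            exact absurd hpx (List.any_eq_false.mp hany x hx)
          have hg : d.getD (PySem.Chars.lowerChar a) 0 = 0 := by
            simp [PySem.Dict.getD, PySem.Dict.get?, hfind]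
          simp [hct, hg]
      simp only [List.foldl_cons, h1, List.filter_cons, bne, hcb]
      simp only [Bool.not_false, if_true, List.foldl_cons]
      exact ih _

theorem analiza_items (texto : String) :
    (texto.toList.foldl aStep PySem.Dict.empty).items
      = (PySem.Set.ofList ((PySem.Chars.lower texto.toList).filter (fun c => c != ' '))).map
          (fun k => (k, (List.count k ((PySem.Chars.lower texto.toList).filter (fun c => c != ' ')) : Int))) := by
  rw [foldl_aStep_eq, PySem.Dict.foldl_insert_getD_add_one_eq_counter, PySem.Dict.items_counter]

theorem ofList_append (l : List Char) (c : Char) :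
    PySem.Set.ofList (l ++ [c])
      = if c ∈ l then PySem.Set.ofList l else PySem.Set.ofList l ++ [c] := by
  have h1 : PySem.Set.ofList (l ++ [c]) = PySem.Set.add (PySem.Set.ofList l) c := by
    simp [PySem.Set.ofList, List.foldl_append]
  have h2 : (PySem.Set.ofList l).contains c = true ↔ c ∈ l := by
    constructor
    · intro hh
      exact (PySem.Set.mem_ofList l c).mp (by simpa using hh)
    · intro hh
      simpa using (PySem.Set.mem_ofList l c).mpr hh
  rw [h1]
  unfold PySem.Set.add
  by_cases hc : c ∈ l
  · rw [if_pos (h2.mpr hc), if_pos hc]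
  · rw [if_neg (fun hh => hc (h2.mp hh)), if_neg hc]

theorem ofList_sublist (l : List Char) : List.Sublist (PySem.Set.ofList l : List Char) l := by
  induction l using List.reverseRecOn with
  | nil => simp [PySem.Set.ofList]
  | append_singleton l c ih =>
    rw [ofList_append]
    by_cases hc : c ∈ l
    · simpa [hc] using ih.trans (List.sublist_append_left l [c])
    · simpa [hc] using List.Sublist.append ih (List.Sublist.refl [c])

theorem rev_head (s : List Char) (hs : s.Pairwise (· ≤ ·)) (hnd : s.Nodup) (c : Char)
    (hc : c ∈ s) (hb : ∀ x ∈ s, x ≤ c) : ∃ t, s.reverse = c :: t ∧ c ∉ t := by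
  rcases hrev : s.reverse with _ | ⟨h, t⟩
  · exfalso
    have : s = [] := by simpa using congrArg List.reverse hrev
    simp [this] at hc
  · have hhs : h ∈ s := by
      have : h ∈ s.reverse := by simp [hrev]
      simpa using this
    have hpr : (s.reverse).Pairwise (fun a b => b ≤ a) := List.pairwise_reverse.mpr hs
    have hcr : c ∈ s.reverse := by simpa using hc
    have hch : c = h := by
      rw [hrev] at hcr
      rcases List.mem_cons.mp hcr with h1 | h1
      · exact h1
      · have hle : c ≤ h := by
          rw [hrev] at hpr
          exact (List.pairwise_cons.mp hpr).1 c h1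
        exact le_antisymm hle (hb h hhs)
    subst hch
    refine ⟨t, rfl, ?_⟩
    have hndr : (s.reverse).Nodup := by simpa using hnd
    rw [hrev] at hndr
    exact (List.nodup_cons.mp hndr).1

theorem foldl_bRunStep_eq (l : List Char) (h : l.Pairwise (· ≤ ·)) :
    l.foldl bRunStep []
      = ((PySem.Set.ofList l : List Char).reverse).map (fun c => (c, (List.count c l : Int))) := by
  induction l using List.reverseRecOn with
  | nil => simp [PySem.Set.ofList]
  | append_singleton l c ih =>
    have hl : l.Pairwise (· ≤ ·) := (List.pairwise_append.mp h).1
    have hb : ∀ x ∈ l, x ≤ c := by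
      intro x hx
      exact (List.pairwise_append.mp h).2.2 x hx c (by simp)
    have hofp : (PySem.Set.ofList l : List Char).Pairwise (· ≤ ·) :=
      hl.sublist (ofList_sublist l)
    rw [List.foldl_append, List.foldl_cons, List.foldl_nil, ih hl]
    by_cases hc : c ∈ l
    · have hof : PySem.Set.ofList (l ++ [c]) = PySem.Set.ofList l := by
        rw [ofList_append]; simp [hc]
      obtain ⟨t, ht, hct⟩ := rev_head (PySem.Set.ofList l) hofp (PySem.Set.nodup_ofList l) c
        ((PySem.Set.mem_ofList l c).mpr hc)
        (fun x hx => hb x ((PySem.Set.mem_ofList l x).mp hx))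
      have hcnt : (List.count c (l ++ [c]) : Int) = (List.count c l : Int) + 1 := by
        have hn : List.count c (l ++ [c]) = List.count c l + 1 := by
          rw [List.count_append]; simp
        exact_mod_cast hn
      have htail : List.map (fun x => (x, (List.count x (l ++ [c]) : Int))) t
          = List.map (fun x => (x, (List.count x l : Int))) t := by
        apply List.map_congr_left
        intro x hx
        have hcx : ¬ c = x := fun e => hct (by rw [e]; exact hx)
        have hn : List.count x (l ++ [c]) = List.count x l := by
          rw [List.count_append]
          simp [hcx]
        rw [hn]
      rw [hof, ht]
      simp only [List.map_cons, bRunStep, beq_self_eq_true, if_true]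
      rw [hcnt, htail]
    · have hc0 : List.count c l = 0 := List.count_eq_zero.mpr hc
      have hof : PySem.Set.ofList (l ++ [c]) = PySem.Set.ofList l ++ [c] := by
        rw [ofList_append]; simp [hc]
      have hcnt1 : (List.count c (l ++ [c]) : Int) = 1 := by
        have hn : List.count c (l ++ [c]) = 1 := by
          rw [List.count_append, hc0]; simp
        exact_mod_cast hn
      have hmap : List.map (fun x => (x, (List.count x (l ++ [c]) : Int)))
            ((PySem.Set.ofList l : List Char).reverse)
          = List.map (fun x => (x, (List.count x l : Int)))
            ((PySem.Set.ofList l : List Char).reverse) := by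
        apply List.map_congr_left
        intro x hx
        have hxl : x ∈ l := (PySem.Set.mem_ofList l x).mp (by simpa using hx)
        have hcx : ¬ c = x := fun e => hc (by rw [e]; exact hxl)
        have hn : List.count x (l ++ [c]) = List.count x l := by
          rw [List.count_append]
          simp [hcx]
        rw [hn]
      rw [hof, List.reverse_append]
      simp only [List.reverse_singleton, List.singleton_append, List.map_cons]
      rw [hmap, hcnt1]
      rcases hrev : (PySem.Set.ofList l : List Char).reverse with _ | ⟨k, t⟩
      · simp [bRunStep]
      · have hkne : (k == c) = false := by
          have hkl : k ∈ l := by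
            have : k ∈ (PySem.Set.ofList l : List Char) := by
              have : k ∈ (PySem.Set.ofList l : List Char).reverse := by simp [hrev]
              simpa using this
            exact (PySem.Set.mem_ofList l k).mp this
          have : k ≠ c := fun e => hc (e ▸ hkl)
          simpa using this
        simp only [List.map_cons, bRunStep, hkne, Bool.false_eq_true, if_false]

theorem find?_beq_self_of_mem (ks : List Char) (c : Char) (hc : c ∈ ks) :
    ks.find? (fun x => x == c) = some c := by
  induction ks with
  | nil => simp at hc
  | cons a t ih =>
    by_cases hac : (a == c) = true
    · have ha : a = c := by simpa using hac
      simp [ha]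
    · have hct : c ∈ t := by
        rcases List.mem_cons.mp hc with h1 | h1
        · exact absurd (by simp [h1]) hac
        · exact h1
      simp [hac, ih hct]

theorem rd_getD (l : List Char) (h : l.Pairwise (· ≤ ·)) (c : Char) (hc : c ∈ l) :
    ((l.foldl bRunStep []).foldl
        (fun (d : PySem.Dict Char Int) p => d.insert p.1 p.2) PySem.Dict.empty).getD c 0
      = (List.count c l : Int) := by
  rw [foldl_bRunStep_eq l h]
  have hksnd : ((PySem.Set.ofList l : List Char).reverse).Nodup := by
    rw [List.nodup_reverse]
    exact PySem.Set.nodup_ofList l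
  have hitems :
      ((((PySem.Set.ofList l : List Char).reverse).map (fun c => (c, (List.count c l : Int)))).foldl
        (fun (d : PySem.Dict Char Int) p => d.insert p.1 p.2) PySem.Dict.empty).items
      = ((PySem.Set.ofList l : List Char).reverse).map (fun c => (c, (List.count c l : Int))) := by
    have hfresh : ∀ a ∈ ((PySem.Set.ofList l : List Char).reverse).map
        (fun c => (c, (List.count c l : Int))),
        (PySem.Dict.empty : PySem.Dict Char Int).contains a.1 = false := by
      intro a _
      simp [PySem.Dict.contains, PySem.Dict.empty]
    have hnd : (List.map Prod.fst (((PySem.Set.ofList l : List Char).reverse).map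
        (fun c => (c, (List.count c l : Int))))).Nodup := by
      rw [List.map_map]
      have hid : (Prod.fst ∘ fun c : Char => (c, (List.count c l : Int))) = fun c => c := rfl
      rw [hid]
      simp only [List.map_id']
      exact hksnd
    have := PySem.Dict.items_foldl_insert_fresh
      (l := ((PySem.Set.ofList l : List Char).reverse).map (fun c => (c, (List.count c l : Int))))
      (k := Prod.fst) (v := Prod.snd) (d := PySem.Dict.empty) hfresh hnd
    simpa [PySem.Dict.empty] using this
  have hmem : c ∈ ((PySem.Set.ofList l : List Char)).reverse := by
    rw [List.mem_reverse]
    exact (PySem.Set.mem_ofList l c).mpr hc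
  simp only [PySem.Dict.getD, PySem.Dict.get?, hitems]
  rw [List.find?_map]
  have hcomp : ((fun p : Char × Int => p.1 == c) ∘ (fun x => (x, (List.count x l : Int))))
      = fun x => x == c := rfl
  rw [hcomp, find?_beq_self_of_mem _ _ hmem]
  simp

-- ===== VERDICT =====
theorem analiza_spec : Claim_equal_analiza := by
  intro texto _
  unfold Spec_analiza analiza analiza_alt
  simp only [PySem.Str.toList_lower, PySem.List.dedup]
  rw [analiza_items, List.map_map]
  have hp : (PySem.List.sorted ((PySem.Chars.lower texto.toList).filter (fun c => c != ' ')) id).Pairwise (· ≤ ·) := by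
    simpa using PySem.List.sorted_pairwise ((PySem.Chars.lower texto.toList).filter (fun c => c != ' ')) id
  have hperm := PySem.List.sorted_perm ((PySem.Chars.lower texto.toList).filter (fun c => c != ' ')) id false
  apply List.map_congr_left
  intro k hk
  have hkcs : k ∈ (PySem.Chars.lower texto.toList).filter (fun c => c != ' ') :=
    (PySem.Set.mem_ofList _ _).mp hk
  have hks : k ∈ PySem.List.sorted ((PySem.Chars.lower texto.toList).filter (fun c => c != ' ')) id :=
    hperm.mem_iff.mpr hkcs
  have hrd := rd_getD _ hp k hks
  simp only [Function.comp_apply]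
  rw [hrd, hperm.count_eq]
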